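-- pv_equiv track=rewrite | github.com/teemupaloniemi/huffman | huffman.py | codewords
-- ===== SOURCE A (Python) =====
-- def codewords(p, t):
--     paths = []
--     for pi in p:
--         path = []
--         parent = pi
--         for i in range(len(t)):
--             if t[i][1] == parent:
--                 parent = t[i][0]
--                 path.append("1")
--             elif t[i][2] == parent:
--                 path.append("0")
--                 parent = t[i][0]
--         paths.append("".join(reversed(path)))
--     return paths
-- ===== SOURCE B (Python) =====
-- def codewords(p, t):
--     # One backward pass over t builds code[x] = codeword suffix for node value x,
--     # then each leaf is a single dict lookup.
--     code = {}
--     for a, b, c in reversed(t):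
--         va = code.get(a, "")
--         code[c] = va + "0"
--         code[b] = va + "1"
--     return [code.get(pi, "") for pi in p]
-- ===== Notes on version B (the rewrite author's own statement) =====
-- stated objective: faster
-- what changed: Instead of rescanning the whole parent table once per leaf, B makes one backward pass over the table building a dict value->codeword (child = parent's codeword plus its bit) and then answers each leaf with a single dict lookup.
import Mathlib
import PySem

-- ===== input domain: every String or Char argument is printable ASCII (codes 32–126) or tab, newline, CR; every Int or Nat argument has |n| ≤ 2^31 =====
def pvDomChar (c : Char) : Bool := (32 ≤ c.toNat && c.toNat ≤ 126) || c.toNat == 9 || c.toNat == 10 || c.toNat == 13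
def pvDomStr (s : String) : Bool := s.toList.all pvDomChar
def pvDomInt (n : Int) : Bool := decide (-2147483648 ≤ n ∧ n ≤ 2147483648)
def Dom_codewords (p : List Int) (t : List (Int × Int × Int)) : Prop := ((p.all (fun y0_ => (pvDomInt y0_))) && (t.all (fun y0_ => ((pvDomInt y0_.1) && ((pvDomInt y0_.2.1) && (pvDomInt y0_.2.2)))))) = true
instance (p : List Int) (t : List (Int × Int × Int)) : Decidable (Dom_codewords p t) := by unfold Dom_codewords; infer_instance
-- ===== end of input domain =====

-- B replaces A's per-leaf rescans of the whole table by ONE backward pass building a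
-- value→codeword dict, then a single lookup per leaf (objective: faster).

-- ===== PORT A =====
def codewords (p : List Int) (t : List (Int × Int × Int)) : List String :=
  p.foldl (fun paths pi =>
    let st := t.foldl (fun (s : Int × List String) row =>
      if row.2.1 == s.1 then (row.1, s.2 ++ ["1"])
      else if row.2.2 == s.1 then (row.1, s.2 ++ ["0"])
      else s) (pi, ([] : List String))
    paths ++ [PySem.Str.join "" st.2.reverse]) []

-- ===== PORT B =====
def codewords_alt (p : List Int) (t : List (Int × Int × Int)) : List String :=
  let code := t.foldr (fun row (m : PySem.Dict Int String) =>
    let va := m.getD row.1 ""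
    (m.insert row.2.2 (va ++ "0")).insert row.2.1 (va ++ "1")) PySem.Dict.empty
  p.map (fun pi => code.getD pi "")

-- ===== PRECONDITION & SPEC =====
def Spec_codewords (p : List Int) (t : List (Int × Int × Int)) (out : List String) : Prop := out = codewords_alt p t
instance (p : List Int) (t : List (Int × Int × Int)) (out : List String) : Decidable (Spec_codewords p t out) := by unfold Spec_codewords; infer_instance

-- ===== CLAIM (what is proved, stated in full; the proofs are below) =====
def Claim_equal_codewords : Prop := ∀ (p : List Int) (t : List (Int × Int × Int)), Dom_codewords p t → Spec_codewords p t (codewords p t)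

-- ===== LEMMAS AND PROOFS =====

/-- The codeword (already in final orientation) produced by A's inner scan over `t`
starting with `x` as the current parent. -/
def astr : List (Int × Int × Int) → Int → String
  | [], _ => ""
  | (a, b, c) :: rest, x =>
      if b = x then astr rest a ++ "1"
      else if c = x then astr rest a ++ "0"
      else astr rest x

theorem buildm_getD (t : List (Int × Int × Int)) (x : Int) :
    (t.foldr (fun row (m : PySem.Dict Int String) =>
      let va := m.getD row.1 ""
      (m.insert row.2.2 (va ++ "0")).insert row.2.1 (va ++ "1")) PySem.Dict.empty).getD x ""
    = astr t x := by
  induction t generalizing x with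
  | nil => simp [astr, PySem.Dict.getD_empty]
  | cons r rest ih =>
      obtain ⟨a, b, c⟩ := r
      simp only [List.foldr_cons, astr, PySem.Dict.getD_insert, ih]
      by_cases hb : x = b <;> by_cases hc : x = c <;>
        simp [hb, hc, eq_comm]

theorem flat_cons (l : List Char) (m : List (List Char)) :
    (List.intersperse ([] : List Char) (l :: m)).flatten = l ++ (List.intersperse [] m).flatten := by
  cases m <;> simp

theorem join_empty_nil : PySem.Str.join "" [] = "" := by
  simp [PySem.Str.join, PySem.Chars.join, List.intercalate]

theorem join_empty_cons (s : String) (rest : List String) :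
    PySem.Str.join "" (s :: rest) = s ++ PySem.Str.join "" rest := by
  have he : "".toList = ([] : List Char) := rfl
  simp only [PySem.Str.join, PySem.Chars.join, List.intercalate, List.map_cons, he]
  rw [flat_cons, String.congr_append]
  simp

theorem afold_eq_astr (t : List (Int × Int × Int)) (x : Int) (acc : List String) :
    PySem.Str.join "" ((t.foldl (fun (s : Int × List String) row =>
      if row.2.1 == s.1 then (row.1, s.2 ++ ["1"])
      else if row.2.2 == s.1 then (row.1, s.2 ++ ["0"])
      else s) (x, acc)).2).reverse
    = astr t x ++ PySem.Str.join "" acc.reverse := by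
  simp only [beq_iff_eq]
  induction t generalizing x acc with
  | nil => simp [astr]
  | cons r rest ih =>
      obtain ⟨a, b, c⟩ := r
      simp only [List.foldl_cons, astr]
      by_cases hb : b = x <;> by_cases hc : c = x <;>
        simp only [hb, hc, if_pos, if_neg, not_false_iff] <;>
        rw [ih] <;> simp [join_empty_cons, String.append_assoc]

-- ===== VERDICT (by name: the statement is the Claim_ definition above) =====
theorem codewords_spec : Claim_equal_codewords := by
  intro p t _
  unfold Spec_codewords codewords codewords_alt
  rw [PySem.List.foldl_append_singleton_eq_map]
  simp only [List.nil_append]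
  apply List.map_congr_left
  intro pi _
  rw [afold_eq_astr, buildm_getD]
  simp [join_empty_nil]
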